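-- pv_equiv track=rewrite | github.com/jazav/ProjectDashboard | launcher.py | get_plan_fact
-- ===== SOURCE A (Python) =====
-- def get_plan_fact(parameters):
--     plan = False
--     fact = False
--     if parameters is None or parameters.strip() == "":
--         plan = True
--         fact = True
--         return plan, fact
--
--     prmt_list = parameters.split(',')
--     for param in prmt_list:
--         if "plan" in param:
--             plan = True
--         if "fact" in param:
--             fact = True
--     return plan, fact
-- ===== SOURCE B (Python) =====
-- def get_plan_fact(parameters):
--     if parameters is None or parameters.strip() == "":
--         return True, True
--     return "plan" in parameters, "fact" in parameters
-- ===== Notes on version B (the rewrite author's own statement) =====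
-- stated objective: simpler
-- what changed: Replaced the split-on-comma list plus per-piece loop with two whole-string substring tests (valid because neither needle contains a comma), keeping the None/blank guard.
import Mathlib
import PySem

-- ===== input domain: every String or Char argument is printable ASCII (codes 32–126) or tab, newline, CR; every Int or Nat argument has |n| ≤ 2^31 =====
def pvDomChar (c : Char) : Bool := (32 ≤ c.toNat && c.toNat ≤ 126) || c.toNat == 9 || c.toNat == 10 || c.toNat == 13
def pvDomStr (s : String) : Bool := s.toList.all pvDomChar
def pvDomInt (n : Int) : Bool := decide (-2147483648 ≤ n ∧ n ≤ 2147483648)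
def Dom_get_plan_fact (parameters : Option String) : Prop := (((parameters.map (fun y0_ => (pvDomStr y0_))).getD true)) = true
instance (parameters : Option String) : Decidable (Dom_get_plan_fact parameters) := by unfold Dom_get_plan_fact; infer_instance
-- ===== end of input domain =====

-- B replaces A's split-on-comma list and per-piece loop by two whole-string substring tests
-- (simpler; neither needle contains a comma, so presence in some piece equals presence in the string).

-- ===== PORT A =====
-- string operations are ported on the List Char side (PySem.Chars), as PYSEM.md prescribes
def get_plan_fact (parameters : Option String) : Bool × Bool :=
  match parameters with
  | none => (true, true)
  | some s =>
    if PySem.Str.strip s == "" then (true, true)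
    else
      let prmt_list := PySem.Chars.splitOn s.toList [',']
      prmt_list.foldl
        (fun (st : Bool × Bool) param =>
          let plan := if PySem.Chars.isIn "plan".toList param then true else st.1
          let fact := if PySem.Chars.isIn "fact".toList param then true else st.2
          (plan, fact))
        (false, false)

-- ===== PORT B =====
def get_plan_fact_alt (parameters : Option String) : Bool × Bool :=
  match parameters with
  | none => (true, true)
  | some s =>
    if PySem.Str.strip s == "" then (true, true)
    else (PySem.Str.isIn "plan" s, PySem.Str.isIn "fact" s)

-- ===== PRECONDITION & SPEC =====
def Spec_get_plan_fact (parameters : Option String) (out : Bool × Bool) : Prop := out = get_plan_fact_alt parameters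
instance (parameters : Option String) (out : Bool × Bool) : Decidable (Spec_get_plan_fact parameters out) := by unfold Spec_get_plan_fact; infer_instance

-- ===== CLAIM (what is proved, stated in full; the proofs are below) =====
def Claim_equal_get_plan_fact : Prop := ∀ (parameters : Option String), Dom_get_plan_fact parameters → Spec_get_plan_fact parameters (get_plan_fact parameters)

-- ===== LEMMAS AND PROOFS =====

-- reference recursion equal to splitting on ',' (proof-side only)
def pvSplitAux : List Char → List Char → List (List Char)
  | [], cur => [cur.reverse]
  | c :: rest, cur => if c = ',' then cur.reverse :: pvSplitAux rest [] else pvSplitAux rest (c :: cur)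

theorem pv_go_eq (l : List Char) : ∀ (fuel : Nat) (cur : List Char) (acc : List (List Char)),
    l.length < fuel →
    PySem.Chars.splitOn.go [','] fuel l cur acc = acc.reverse ++ pvSplitAux l cur := by
  induction l with
  | nil =>
    intro fuel cur acc h
    match fuel, h with
    | fuel+1, _ => simp [PySem.Chars.splitOn.go, pvSplitAux]
  | cons c rest ih =>
    intro fuel cur acc h
    match fuel, h with
    | fuel+1, h =>
      simp only [PySem.Chars.splitOn.go]
      by_cases hc : c = ','
      · subst hc
        simp only [List.isPrefixOf, BEq.rfl, Bool.and_eq_true, List.drop, List.length_singleton]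
        rw [ih fuel [] (cur.reverse :: acc) (by simpa using h)]
        simp [pvSplitAux]
      · have hp : [','].isPrefixOf (c :: rest) = false := by
          simp [List.isPrefixOf]
          exact fun h' => absurd h'.symm hc
        simp only [hp]
        rw [ih fuel (c :: cur) acc (by simpa using h)]
        simp [pvSplitAux, hc]

theorem pv_splitOn_eq (cs : List Char) : PySem.Chars.splitOn cs [','] = pvSplitAux cs [] := by
  have := pv_go_eq cs (cs.length + 1) [] [] (by omega)
  simpa [PySem.Chars.splitOn] using this

-- an occurrence of a comma-free pattern in u ++ ',' :: v lies inside u or inside v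
theorem pv_infix_split (sub u v : List Char) (hx : ',' ∉ sub) :
    sub <:+: u ++ ',' :: v ↔ sub <:+: u ∨ sub <:+: v := by
  constructor
  · rintro ⟨a, b, hab⟩
    have hlen : a.length + sub.length + b.length = u.length + 1 + v.length := by
      have := congrArg List.length hab
      simp at this; omega
    rcases Nat.lt_or_ge u.length a.length with hm | hm
    · right
      have hs1 : sub ++ b <:+ u ++ ',' :: v := ⟨a, by simpa [List.append_assoc] using hab⟩
      have hs2 : v <:+ u ++ ',' :: v :=
        (List.suffix_cons ',' v).trans (List.suffix_append u (',' :: v))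
      have hsub : sub ++ b <:+ v :=
        List.suffix_of_suffix_length_le hs1 hs2 (by simp; omega)
      exact ((List.prefix_append sub b).isInfix).trans hsub.isInfix
    · rcases Nat.lt_or_ge u.length (a.length + sub.length) with hm2 | hm2
      · exfalso
        have hab' : a ++ (sub ++ b) = u ++ ',' :: v := by simpa [List.append_assoc] using hab
        have hlt : u.length < (u ++ ',' :: v).length := by simp
        have hlt2 : u.length < (a ++ (sub ++ b)).length := by simp; omega
        have h1 : (u ++ ',' :: v)[u.length]'hlt = ',' := by
          rw [List.getElem_append_right (le_refl _)]
          simp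
        have h2 : (a ++ (sub ++ b))[u.length]'hlt2 = sub[u.length - a.length]'(by omega) := by
          rw [List.getElem_append_right hm]
          rw [List.getElem_append_left (by omega)]
        have h3 : (a ++ (sub ++ b))[u.length]'hlt2 = (u ++ ',' :: v)[u.length]'hlt :=
          List.getElem_of_eq hab' hlt2
        have : sub[u.length - a.length]'(by omega) = ',' := by rw [← h2, h3, h1]
        exact hx (this ▸ List.getElem_mem _)
      · left
        have hp1 : a ++ sub <+: u ++ ',' :: v := ⟨b, by simpa [List.append_assoc] using hab⟩
        have hp2 : u <+: u ++ ',' :: v := List.prefix_append u (',' :: v)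
        have := List.prefix_of_prefix_length_le hp1 hp2 (by simp; omega)
        exact ((List.suffix_append a sub).isInfix).trans this.isInfix
  · rintro (h | h)
    · exact h.trans (List.prefix_append u (',' :: v)).isInfix
    · exact h.trans ((List.suffix_cons ',' v).trans (List.suffix_append u (',' :: v))).isInfix

theorem pv_any_splitAux (sub : List Char) (hx : ',' ∉ sub) :
    ∀ (l cur : List Char),
      ((pvSplitAux l cur).any (fun p => PySem.Chars.isIn sub p))
        = PySem.Chars.isIn sub (cur.reverse ++ l) := by
  intro l
  induction l with
  | nil =>
    intro cur
    simp [pvSplitAux]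
  | cons c rest ih =>
    intro cur
    by_cases hc : c = ','
    · subst hc
      rw [show pvSplitAux (',' :: rest) cur = cur.reverse :: pvSplitAux rest [] from by
        simp [pvSplitAux]]
      rw [List.any_cons, ih []]
      rw [Bool.eq_iff_iff]
      simp only [Bool.or_eq_true, PySem.Chars.isIn_iff_infix, List.reverse_nil, List.nil_append]
      rw [pv_infix_split sub cur.reverse rest hx]
    · simp only [pvSplitAux, if_neg hc]
      rw [ih (c :: cur)]
      simp

theorem pv_foldl_eq (pieces : List (List Char)) : ∀ (b1 b2 : Bool),
    pieces.foldl
      (fun (st : Bool × Bool) param =>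
        let plan := if PySem.Chars.isIn "plan".toList param then true else st.1
        let fact := if PySem.Chars.isIn "fact".toList param then true else st.2
        (plan, fact)) (b1, b2)
    = (b1 || pieces.any (fun p => PySem.Chars.isIn "plan".toList p),
       b2 || pieces.any (fun p => PySem.Chars.isIn "fact".toList p)) := by
  induction pieces with
  | nil => intro b1 b2; simp
  | cons p rest ih =>
    intro b1 b2
    simp only [List.foldl_cons, List.any_cons, ih, Prod.mk.injEq]
    constructor <;> (split <;> simp_all)

-- ===== VERDICT (by name: the statement is the Claim_ definition above) =====
theorem get_plan_fact_spec : Claim_equal_get_plan_fact := by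
  intro parameters _
  unfold Spec_get_plan_fact get_plan_fact get_plan_fact_alt
  match parameters with
  | none => rfl
  | some s =>
    simp only
    split
    · rfl
    · rw [pv_splitOn_eq, pv_foldl_eq,
        pv_any_splitAux "plan".toList (by decide),
        pv_any_splitAux "fact".toList (by decide)]
      simp [PySem.Str.isIn]
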